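-- pv_equiv track=rewrite | github.com/TheWorldAvatar/mcp-tool-layer | src/agents/scripts_and_prompts_generation/direct_script_generation.py | _rewrite_main_relative_imports
-- ===== SOURCE A (Python) =====
-- def _rewrite_main_relative_imports(code: str, owners: dict[str, str]) -> str:
--     """
--     Rewrite `from .<module> import (...)` blocks so each function is imported from the module
--     where it is actually defined.
--
--     We preserve non-relative imports and keep aliases (e.g., `foo as _foo`) stable.
--     """
--     lines = code.splitlines()
--
--     # Strip ALL existing relative imports (both multiline blocks and single-line imports),
--     # then deterministically re-add correct owner-based imports.
--     #
--     # This is intentionally aggressive to prevent LLM placeholder patterns like: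
--     #   from .module import foo as _foo
--     # from surviving into fragments / stitched mains.
--     out: list[str] = []
--     i = 0
--     while i < len(lines):
--         line = lines[i]
--         if line.startswith("from .") and " import (" in line:
--             # skip until matching ')'
--             i += 1
--             while i < len(lines) and lines[i].strip() != ")":
--                 i += 1
--             # skip the ')'
--             if i < len(lines) and lines[i].strip() == ")":
--                 i += 1
--             # also skip following blank line
--             if i < len(lines) and lines[i].strip() == "":
--                 i += 1
--             continue
--         if line.startswith("from .") and " import " in line:
--             # single-line relative import -> drop
--             i += 1
--             continue
--         out.append(line)
--         i += 1
--
--     # Find insertion point: after last non-relative import at top.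
--     insert_at = 0
--     for idx, line in enumerate(out):
--         if line.startswith("import ") or line.startswith("from "):
--             insert_at = idx + 1
--             continue
--         # stop once we hit first non-import statement
--         if line.strip() and not line.startswith("#"):
--             break
--
--     # Determine which functions are referenced as `_fn` aliases in code.
--     referenced: set[str] = set()
--     for name in owners.keys():
--         if f"_{name}" in code:
--             referenced.add(name)
--     # Fallback: if not detectable, import all known functions.
--     if not referenced:
--         referenced = set(owners.keys())
--
--     # Build new grouped import blocks.
--     grouped: dict[str, list[str]] = {}
--     for fn in sorted(referenced):
--         mod = owners.get(fn)
--         if not mod: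
--             continue
--         grouped.setdefault(mod, []).append(fn)
--
--     import_blocks: list[str] = []
--     for mod, fns in sorted(grouped.items()):
--         import_blocks.append(f"from .{mod} import (")
--         for fn in fns:
--             import_blocks.append(f"    {fn} as _{fn},")
--         import_blocks.append(")")
--         import_blocks.append("")
--
--     new_lines = out[:insert_at] + [""] + import_blocks + out[insert_at:]
--     # Normalize excessive blank lines
--     return "\n".join(new_lines).replace("\n\n\n", "\n\n").rstrip() + "\n"
-- ===== SOURCE B (Python) =====
-- def _rewrite_main_relative_imports(code: str, owners: dict[str, str]) -> str:
--     """Same rewrite, restructured: a single-pass mode state machine strips relative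
--     imports, the insertion point is found by a backward scan over the header prefix,
--     and import blocks are built per-module by filtering the sorted referenced names."""
--     lines = code.splitlines()
--
--     # One forward pass with an explicit mode: 0 = normal, 1 = inside a `(`-block,
--     # 2 = just closed a block (one following blank line is dropped).
--     out: list[str] = []
--     mode = 0
--     for line in lines:
--         if mode == 1:
--             if line.strip() == ")":
--                 mode = 2
--         elif mode == 2 and line.strip() == "":
--             mode = 0
--         else:
--             mode = 0
--             if line.startswith("from ."):
--                 if " import (" in line:
--                     mode = 1
--                 elif " import " not in line:
--                     out.append(line)
--             else:
--                 out.append(line)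
--
--     # Header prefix = leading imports / blanks / comments; insert after its last import.
--     header: list[str] = []
--     for line in out:
--         if (line.startswith("import ") or line.startswith("from ")
--                 or not line.strip() or line.startswith("#")):
--             header.append(line)
--         else:
--             break
--     insert_at = 0
--     for idx in range(len(header) - 1, -1, -1):
--         if header[idx].startswith("import ") or header[idx].startswith("from "):
--             insert_at = idx + 1
--             break
--
--     # Referenced names, already sorted; fall back to all names.
--     names = sorted(owners)
--     referenced = [n for n in names if "_" + n in code]
--     if not referenced:
--         referenced = names
--
--     # One block per module, modules in sorted order, names filtered per module.
--     import_blocks: list[str] = []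
--     for mod in sorted({owners[n] for n in referenced if owners[n]}):
--         import_blocks.append("from ." + mod + " import (")
--         for fn in [n for n in referenced if owners[n] == mod]:
--             import_blocks.append("    " + fn + " as _" + fn + ",")
--         import_blocks.append(")")
--         import_blocks.append("")
--
--     new_lines = out[:insert_at] + [""] + import_blocks + out[insert_at:]
--     return "\n".join(new_lines).replace("\n\n\n", "\n\n").rstrip() + "\n"
-- ===== Notes on version B (the rewrite author's own statement) =====
-- stated objective: alternative
-- what changed: B replaces A's indexed while-loop with nested skip-loops by a single forward pass driven by an explicit mode state machine, computes the insertion point by a backward scan over the collected header prefix instead of A's forward accumulator loop, and emits import blocks by filtering the sorted referenced-name list once per sorted module instead of building a setdefault-grouping dict and sorting its items (the per-module filter costs O(M*K) where A's grouping pass is O(K log K)).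
import Mathlib
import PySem

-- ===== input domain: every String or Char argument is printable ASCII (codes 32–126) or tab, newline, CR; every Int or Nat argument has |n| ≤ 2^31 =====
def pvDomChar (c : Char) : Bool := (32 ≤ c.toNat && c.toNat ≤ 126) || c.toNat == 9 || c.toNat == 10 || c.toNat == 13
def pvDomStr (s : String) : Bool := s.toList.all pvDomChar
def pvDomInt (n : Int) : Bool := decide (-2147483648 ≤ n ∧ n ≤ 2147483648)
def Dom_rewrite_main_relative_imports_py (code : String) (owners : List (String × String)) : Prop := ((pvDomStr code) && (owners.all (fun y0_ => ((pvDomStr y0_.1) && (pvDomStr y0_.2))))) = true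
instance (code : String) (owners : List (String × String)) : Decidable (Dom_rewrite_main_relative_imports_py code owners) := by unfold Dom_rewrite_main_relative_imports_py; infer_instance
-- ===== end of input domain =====

-- B restructures A: a one-pass mode state machine replaces A's indexed while-loop with inner
-- skip loops, the insertion point comes from a backward scan of the header prefix, and the
-- import blocks are built per sorted module by filtering the sorted referenced names
-- (objective: alternative structure; the per-module filter trades A's grouping dict for
-- repeated scans of the referenced list, so B is not faster).

-- ===== PORT A =====

-- inner `while i < len(lines) and lines[i].strip() != ")": i += 1`
def aSkipClose (lines : List String) (i : Nat) : Nat :=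
  if h : i < lines.length then
    if PySem.Str.strip (lines.getD i "") == ")" then i
    else aSkipClose lines (i + 1)
  else i
termination_by lines.length - i

theorem aSkipClose_ge (lines : List String) (i : Nat) : i ≤ aSkipClose lines i := by
  unfold aSkipClose
  split
  · split
    · exact Nat.le_refl i
    · exact Nat.le_trans (Nat.le_succ i) (aSkipClose_ge lines (i + 1))
  · exact Nat.le_refl i
termination_by lines.length - i

-- the main `while i < len(lines)` stripping loop of A (i, out are the loop state)
def aStrip (lines : List String) (i : Nat) (out : List String) : List String :=
  if h : i < lines.length then
    let line := lines.getD i ""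
    if PySem.Str.startswith line "from ." && PySem.Str.isIn " import (" line then
      -- skip until matching ')', then the ')', then one following blank line
      let j := aSkipClose lines (i + 1)
      let j1 := if j < lines.length && PySem.Str.strip (lines.getD j "") == ")" then j + 1 else j
      let j2 := if j1 < lines.length && PySem.Str.strip (lines.getD j1 "") == "" then j1 + 1 else j1
      aStrip lines j2 out
    else if PySem.Str.startswith line "from ." && PySem.Str.isIn " import " line then
      aStrip lines (i + 1) out
    else
      aStrip lines (i + 1) (out ++ [line])
  else out
termination_by lines.length - i
decreasing_by
  · have h1 := aSkipClose_ge lines (i + 1)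
    split_ifs <;> omega
  · omega
  · omega

-- A's `for idx, line in enumerate(out)` insertion-point loop (acc = insert_at so far)
def aInsLoop (out : List String) (idx : Nat) (acc : Nat) : Nat :=
  if h : idx < out.length then
    let line := out.getD idx ""
    if PySem.Str.startswith line "import " || PySem.Str.startswith line "from " then
      aInsLoop out (idx + 1) (idx + 1)
    else if PySem.Str.strip line != "" && !PySem.Str.startswith line "#" then acc
    else aInsLoop out (idx + 1) acc
  else acc
termination_by out.length - idx

def rewrite_main_relative_imports_py (code : String) (owners : List (String × String)) : String :=
  -- the Python argument is a dict; rebuild it from the association list exactly as dict() does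
  let d := owners.foldl (fun d kv => d.insert kv.1 kv.2) (∅ : PySem.Dict String String)
  let lines := PySem.Str.splitlines code
  let out := aStrip lines 0 []
  let insert_at := aInsLoop out 0 0
  let referenced :=
    d.keys.foldl (fun s name => if PySem.Str.isIn ("_" ++ name) code then PySem.Set.add s name else s)
      (PySem.Set.ofList [])
  let referenced := if referenced = [] then PySem.Set.ofList d.keys else referenced
  let grouped := (PySem.List.sorted referenced id).foldl (fun g fn =>
      match d.get? fn with          -- owners.get(fn)
      | none => g
      | some mod => if mod = "" then g          -- `if not mod: continue`
        else g.modify mod [] (fun v => v ++ [fn]))   -- grouped.setdefault(mod, []).append(fn)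
    (∅ : PySem.Dict String (List String))
  -- sorted(grouped.items()): dict keys are distinct, so Python's tuple comparison is
  -- decided by the first component alone
  let import_blocks := (PySem.List.sorted grouped.items (fun p => p.1)).foldl (fun bs p =>
      let bs := bs ++ ["from ." ++ p.1 ++ " import ("]
      let bs := p.2.foldl (fun bs fn => bs ++ ["    " ++ fn ++ " as _" ++ fn ++ ","]) bs
      bs ++ [")"] ++ [""]) []
  let new_lines := PySem.List.slice out none (some (insert_at : Int)) ++ [""] ++ import_blocks
      ++ PySem.List.slice out (some (insert_at : Int)) none
  PySem.Str.rstrip (PySem.Str.replace (PySem.Str.join "\n" new_lines) "\n\n\n" "\n\n") ++ "\n"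

-- ===== PORT B =====

-- one step of B's mode state machine (state = (mode, out))
def bStep (st : Nat × List String) (line : String) : Nat × List String :=
  if st.1 == 1 then
    if PySem.Str.strip line == ")" then (2, st.2) else (1, st.2)
  else if st.1 == 2 && PySem.Str.strip line == "" then (0, st.2)
  else if PySem.Str.startswith line "from ." then
    if PySem.Str.isIn " import (" line then (1, st.2)
    else if PySem.Str.isIn " import " line then (0, st.2)
    else (0, st.2 ++ [line])
  else (0, st.2 ++ [line])

-- B's header loop: collect leading imports / blanks / comments, stop at the first other line
def bHeaderLoop : List String → List String
  | [] => []
  | line :: rest =>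
    if PySem.Str.startswith line "import " || PySem.Str.startswith line "from "
        || PySem.Str.strip line == "" || PySem.Str.startswith line "#" then
      line :: bHeaderLoop rest
    else []

-- B's backward scan (applied to the reversed header): 1 + index of the last import line
def bRevScan : List String → Nat
  | [] => 0
  | line :: rest =>
    if PySem.Str.startswith line "import " || PySem.Str.startswith line "from " then
      rest.length + 1
    else bRevScan rest

def rewrite_main_relative_imports_py_alt (code : String) (owners : List (String × String)) : String :=
  -- the Python argument is a dict; rebuild it from the association list exactly as dict() does
  let d := owners.foldl (fun d kv => d.insert kv.1 kv.2) (∅ : PySem.Dict String String)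
  let lines := PySem.Str.splitlines code
  let out := (lines.foldl bStep (0, [])).2
  let insert_at := bRevScan (bHeaderLoop out).reverse
  let names := PySem.List.sorted d.keys id
  let referenced := names.filter (fun n => PySem.Str.isIn ("_" ++ n) code)
  let referenced := if referenced = [] then names else referenced
  -- owners[n] is always present (n ranges over keys), so it is d.getD n ""
  let mods := PySem.List.sorted
    (PySem.Set.ofList ((referenced.map (fun n => d.getD n "")).filter (fun m => m != ""))) id
  let import_blocks := mods.foldl (fun bs mod =>
      bs ++ (["from ." ++ mod ++ " import ("]
        ++ (referenced.filter (fun n => d.getD n "" == mod)).map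
            (fun fn => "    " ++ fn ++ " as _" ++ fn ++ ",")
        ++ [")", ""])) []
  let new_lines := PySem.List.slice out none (some (insert_at : Int)) ++ [""] ++ import_blocks
      ++ PySem.List.slice out (some (insert_at : Int)) none
  PySem.Str.rstrip (PySem.Str.replace (PySem.Str.join "\n" new_lines) "\n\n\n" "\n\n") ++ "\n"

-- ===== PRECONDITION & SPEC =====
def Spec_rewrite_main_relative_imports_py (code : String) (owners : List (String × String)) (out : String) : Prop := out = rewrite_main_relative_imports_py_alt code owners
instance (code : String) (owners : List (String × String)) (out : String) : Decidable (Spec_rewrite_main_relative_imports_py code owners out) := by unfold Spec_rewrite_main_relative_imports_py; infer_instance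

-- ===== CLAIM (what is proved, stated in full; the proofs are below) =====
def Claim_equal_rewrite_main_relative_imports_py : Prop := ∀ (code : String) (owners : List (String × String)), Dom_rewrite_main_relative_imports_py code owners → Spec_rewrite_main_relative_imports_py code owners (rewrite_main_relative_imports_py code owners)

-- ===== LEMMAS AND PROOFS =====

-- the resumption index after A's inner block-skipping (')' then one blank line)
def pvPostClose (lines : List String) (j : Nat) : Nat :=
  if j < lines.length && PySem.Str.strip (lines.getD j "") == ")" then j + 1 else j
def pvPostBlank (lines : List String) (j1 : Nat) : Nat :=
  if j1 < lines.length && PySem.Str.strip (lines.getD j1 "") == "" then j1 + 1 else j1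
def pvPost (lines : List String) (k : Nat) : Nat :=
  pvPostBlank lines (pvPostClose lines (aSkipClose lines k))

-- B's state machine treats a non-blank line after a closed block like a normal line
theorem bStep_two_of_nonblank (out : List String) (line : String)
    (h : (PySem.Str.strip line == "") = false) : bStep (2, out) line = bStep (0, out) line := by
  unfold bStep
  simp only [h]
  rfl

theorem pvBoolFalse {b : Bool} (h : ¬b = true) : b = false := by
  rcases hq : b with _ | _
  · rfl
  · exact absurd hq h

theorem blockSkip (lines : List String) (k : Nat) (out : List String) :
    ((lines.drop k).foldl bStep (1, out)).2
      = ((lines.drop (pvPost lines k)).foldl bStep (0, out)).2 := by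
  by_cases hk : k < lines.length
  · have hdc : lines.drop k = lines.getD k "" :: lines.drop (k + 1) := by
      rw [List.drop_eq_getElem_cons hk, List.getD_eq_getElem _ _ hk]
    by_cases hcl : (PySem.Str.strip (lines.getD k "") == ")") = true
    · have hsc : aSkipClose lines k = k := by rw [aSkipClose, dif_pos hk, if_pos hcl]
      have hb1 : bStep (1, out) (lines.getD k "") = (2, out) := by
        unfold bStep; simp only [hcl]; rfl
      by_cases hk1 : k + 1 < lines.length
      · have hdc1 : lines.drop (k + 1) = lines.getD (k + 1) "" :: lines.drop (k + 2) := by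
          rw [List.drop_eq_getElem_cons hk1, List.getD_eq_getElem _ _ hk1]
        by_cases hbl : (PySem.Str.strip (lines.getD (k + 1) "") == "") = true
        · have c1 : (decide (k < lines.length) && (PySem.Str.strip (lines.getD k "") == ")")) = true := by
            rw [decide_eq_true hk, hcl]; rfl
          have c2 : (decide (k + 1 < lines.length) && (PySem.Str.strip (lines.getD (k + 1) "") == "")) = true := by
            rw [decide_eq_true hk1, hbl]; rfl
          have hpp : pvPost lines k = k + 2 := by
            unfold pvPost pvPostClose pvPostBlank; rw [hsc, if_pos c1, if_pos c2]
          have hb2 : bStep (2, out) (lines.getD (k + 1) "") = (0, out) := by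
            unfold bStep; simp only [hbl]; rfl
          rw [hdc, List.foldl_cons, hb1, hpp, hdc1, List.foldl_cons, hb2]
        · have c1 : (decide (k < lines.length) && (PySem.Str.strip (lines.getD k "") == ")")) = true := by
            rw [decide_eq_true hk, hcl]; rfl
          have c2f : (decide (k + 1 < lines.length) && (PySem.Str.strip (lines.getD (k + 1) "") == "")) = false := by
            rw [pvBoolFalse hbl, Bool.and_false]
          have hpp : pvPost lines k = k + 1 := by
            unfold pvPost pvPostClose pvPostBlank
            rw [hsc, if_pos c1, if_neg (by rw [c2f]; exact Bool.false_ne_true)]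
          rw [hdc, List.foldl_cons, hb1, hpp, hdc1, List.foldl_cons, List.foldl_cons,
            bStep_two_of_nonblank out _ (pvBoolFalse hbl)]
      · have c1 : (decide (k < lines.length) && (PySem.Str.strip (lines.getD k "") == ")")) = true := by
          rw [decide_eq_true hk, hcl]; rfl
        have c2f : (decide (k + 1 < lines.length) && (PySem.Str.strip (lines.getD (k + 1) "") == "")) = false := by
          rw [decide_eq_false hk1, Bool.false_and]
        have hpp : pvPost lines k = k + 1 := by
          unfold pvPost pvPostClose pvPostBlank
          rw [hsc, if_pos c1, if_neg (by rw [c2f]; exact Bool.false_ne_true)]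
        rw [hdc, List.foldl_cons, hb1, hpp, List.drop_eq_nil_of_le (show lines.length ≤ k + 1 by omega)]
        rfl
    · have hsc : aSkipClose lines k = aSkipClose lines (k + 1) := by
        rw [aSkipClose, dif_pos hk, if_neg hcl]
      have hpp : pvPost lines k = pvPost lines (k + 1) := by
        unfold pvPost; rw [hsc]
      have hb : bStep (1, out) (lines.getD k "") = (1, out) := by
        unfold bStep; simp only [pvBoolFalse hcl]; rfl
      rw [hdc, List.foldl_cons, hb, hpp]
      exact blockSkip lines (k + 1) out
  · have hsc : aSkipClose lines k = k := by rw [aSkipClose, dif_neg hk]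
    have c1f : (decide (k < lines.length) && (PySem.Str.strip (lines.getD k "") == ")")) = false := by
      rw [decide_eq_false hk, Bool.false_and]
    have c2f : (decide (k < lines.length) && (PySem.Str.strip (lines.getD k "") == "")) = false := by
      rw [decide_eq_false hk, Bool.false_and]
    have n1 : ¬(decide (k < lines.length) && PySem.Str.strip (lines.getD k "") == ")") = true := by
      rw [c1f]; exact Bool.false_ne_true
    have n2 : ¬(decide (k < lines.length) && PySem.Str.strip (lines.getD k "") == "") = true := by
      rw [c2f]; exact Bool.false_ne_true
    have hpp : pvPost lines k = k := by
      unfold pvPost pvPostClose pvPostBlank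
      rw [hsc]
      rw [if_neg n1]
      rw [if_neg n2]
    rw [hpp, List.drop_eq_nil_of_le (by omega)]
    rfl
termination_by lines.length - k

theorem aStrip_eq (lines : List String) (i : Nat) (out : List String) :
    aStrip lines i out = ((lines.drop i).foldl bStep (0, out)).2 := by
  induction i, out using aStrip.induct (lines := lines) with
  | case1 i out h line hc j j1 j2 ih =>
    have hc' : (PySem.Str.startswith (lines.getD i "") "from ."
        && PySem.Str.isIn " import (" (lines.getD i "")) = true := hc
    obtain ⟨h1, h2⟩ := Bool.and_eq_true_iff.mp hc'
    have hdc : lines.drop i = lines.getD i "" :: lines.drop (i + 1) := by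
      rw [List.drop_eq_getElem_cons h, List.getD_eq_getElem _ _ h]
    have hb : bStep (0, out) (lines.getD i "") = (1, out) := by
      unfold bStep; simp only [h1, h2]; rfl
    rw [aStrip, dif_pos h, if_pos hc, hdc, List.foldl_cons, hb, blockSkip lines (i + 1) out]
    exact ih
  | case2 i out h line hnc hc ih =>
    have hnc' : ¬(PySem.Str.startswith (lines.getD i "") "from ."
        && PySem.Str.isIn " import (" (lines.getD i "")) = true := hnc
    have hc' : (PySem.Str.startswith (lines.getD i "") "from ."
        && PySem.Str.isIn " import " (lines.getD i "")) = true := hc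
    obtain ⟨h1, h2⟩ := Bool.and_eq_true_iff.mp hc'
    have hni : (PySem.Str.isIn " import (" (lines.getD i "")) = false := by
      have := pvBoolFalse hnc'
      rcases hq : PySem.Str.isIn " import (" (lines.getD i "") with _ | _
      · rfl
      · rw [h1, hq] at this; exact absurd this (by simp)
    have hdc : lines.drop i = lines.getD i "" :: lines.drop (i + 1) := by
      rw [List.drop_eq_getElem_cons h, List.getD_eq_getElem _ _ h]
    have hb : bStep (0, out) (lines.getD i "") = (0, out) := by
      unfold bStep; simp only [h1, h2, hni]; rfl
    rw [aStrip, dif_pos h, if_neg hnc, if_pos hc, hdc, List.foldl_cons, hb]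
    exact ih
  | case3 i out h line hnc hnc2 ih =>
    have hnc' : ¬(PySem.Str.startswith (lines.getD i "") "from ."
        && PySem.Str.isIn " import (" (lines.getD i "")) = true := hnc
    have hnc2' : ¬(PySem.Str.startswith (lines.getD i "") "from ."
        && PySem.Str.isIn " import " (lines.getD i "")) = true := hnc2
    have hdc : lines.drop i = lines.getD i "" :: lines.drop (i + 1) := by
      rw [List.drop_eq_getElem_cons h, List.getD_eq_getElem _ _ h]
    have hb : bStep (0, out) (lines.getD i "") = (0, out ++ [lines.getD i ""]) := by
      by_cases hsw : (PySem.Str.startswith (lines.getD i "") "from .") = true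
      · have hni : (PySem.Str.isIn " import (" (lines.getD i "")) = false := by
          have := pvBoolFalse hnc
          rcases hq : PySem.Str.isIn " import (" (lines.getD i "") with _ | _
          · rfl
          · rw [hsw, hq] at this; exact absurd this (by simp)
        have hni2 : (PySem.Str.isIn " import " (lines.getD i "")) = false := by
          have := pvBoolFalse hnc2
          rcases hq : PySem.Str.isIn " import " (lines.getD i "") with _ | _
          · rfl
          · rw [hsw, hq] at this; exact absurd this (by simp)
        unfold bStep; simp only [hsw, hni, hni2]; rfl
      · unfold bStep; simp only [pvBoolFalse hsw]; rfl
    rw [aStrip, dif_pos h, if_neg hnc, if_neg hnc2, hdc, List.foldl_cons, hb]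
    exact ih
  | case4 i out h =>
    rw [aStrip, dif_neg h, List.drop_eq_nil_of_le (by omega)]
    rfl

theorem stripEq (lines : List String) : aStrip lines 0 [] = (lines.foldl bStep (0, [])).2 := by
  rw [aStrip_eq lines 0 [], List.drop_zero]

-- `import `/`from ` test shared by both insertion-point scans
def pvImp (l : String) : Bool := PySem.Str.startswith l "import " || PySem.Str.startswith l "from "

-- index of the LAST import line of a list, if any
def pvLi : List String → Option Nat
  | [] => none
  | x :: xs =>
    match pvLi xs with
    | some k => some (k + 1)
    | none => if pvImp x then some 0 else none

-- `insert_at` from the last-import index and the fallback accumulator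
def pvIns (idx acc : Nat) (o : Option Nat) : Nat :=
  match o with
  | some k => idx + k + 1
  | none => acc

-- header-prefix test of B's header loop
def pvHdr (l : String) : Bool := pvImp l || PySem.Str.strip l == "" || PySem.Str.startswith l "#"

theorem bHeaderLoop_cons (line : String) (rest : List String) :
    bHeaderLoop (line :: rest) = if pvHdr line then line :: bHeaderLoop rest else [] := rfl

theorem bRevScan_cons (line : String) (rest : List String) :
    bRevScan (line :: rest) = if pvImp line then rest.length + 1 else bRevScan rest := rfl

theorem pvLi_cons (x : String) (xs : List String) :
    pvLi (x :: xs) = (match pvLi xs with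
      | some k => some (k + 1)
      | none => if pvImp x then some 0 else none) := rfl

theorem pvLi_append (ys : List String) (y : String) :
    pvLi (ys ++ [y]) = if pvImp y then some ys.length else pvLi ys := by
  induction ys with
  | nil => cases h : pvImp y <;> simp [pvLi, h]
  | cons x xs ih =>
    rw [List.cons_append, pvLi_cons, ih, pvLi_cons]
    cases h : pvImp y <;> cases hx : pvLi xs <;> simp

theorem bRevScan_reverse (hs : List String) :
    bRevScan hs.reverse = pvIns 0 0 (pvLi hs) := by
  induction hs using List.reverseRecOn with
  | nil => rfl
  | append_singleton ys y ih =>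
    rw [List.reverse_append, List.reverse_singleton, List.singleton_append, bRevScan_cons,
      pvLi_append]
    cases h : pvImp y
    · simpa using ih
    · simp [pvIns]

theorem aInsLoop_eq (out : List String) (idx acc : Nat) :
    aInsLoop out idx acc = pvIns idx acc (pvLi (bHeaderLoop (out.drop idx))) := by
  induction idx, acc using aInsLoop.induct (out := out) with
  | case1 idx acc h line himp ih =>
    have hc1 : (PySem.Str.startswith (out.getD idx "") "import "
        || PySem.Str.startswith (out.getD idx "") "from ") = true := himp
    have hdc : List.drop idx out = out.getD idx "" :: List.drop (idx + 1) out := by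
      rw [List.drop_eq_getElem_cons h, List.getD_eq_getElem _ _ h]
    have himp' : pvImp (out.getD idx "") = true := hc1
    have hhdr : pvHdr (out.getD idx "") = true := by unfold pvHdr; rw [himp']; rfl
    rw [aInsLoop, dif_pos h, if_pos hc1, ih, hdc, bHeaderLoop_cons, if_pos hhdr, pvLi_cons]
    cases hli : pvLi (bHeaderLoop (List.drop (idx + 1) out)) with
    | none => simp only [pvIns, himp', if_true]
    | some k => simp only [pvIns]; omega
  | case2 idx acc h line himp hbrk =>
    have hcn : ¬(PySem.Str.startswith (out.getD idx "") "import "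
        || PySem.Str.startswith (out.getD idx "") "from ") = true := himp
    have hc2 : (PySem.Str.strip (out.getD idx "") != ""
        && !PySem.Str.startswith (out.getD idx "") "#") = true := hbrk
    have hdc : List.drop idx out = out.getD idx "" :: List.drop (idx + 1) out := by
      rw [List.drop_eq_getElem_cons h, List.getD_eq_getElem _ _ h]
    obtain ⟨hb1, hb2⟩ := Bool.and_eq_true_iff.mp hc2
    have h1 : (PySem.Str.strip (out.getD idx "") == "") = false := by
      have hb1' : (!(PySem.Str.strip (out.getD idx "") == "")) = true := hb1
      rcases hq : (PySem.Str.strip (out.getD idx "") == "") with _ | _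
      · rfl
      · rw [hq] at hb1'; exact absurd hb1' (by simp)
    have h2 : PySem.Str.startswith (out.getD idx "") "#" = false := by
      rcases hq : PySem.Str.startswith (out.getD idx "") "#" with _ | _
      · rfl
      · rw [hq] at hb2; exact absurd hb2 (by simp)
    have himp' : pvImp (out.getD idx "") = false := by
      rcases hq : pvImp (out.getD idx "") with _ | _
      · rfl
      · exact absurd hq hcn
    have hhdr : pvHdr (out.getD idx "") = false := by
      unfold pvHdr; rw [himp', h1, h2]; rfl
    rw [aInsLoop, dif_pos h, if_neg hcn, if_pos hc2, hdc, bHeaderLoop_cons]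
    rw [if_neg (show ¬pvHdr (out.getD idx "") = true by rw [hhdr]; simp)]
    rfl
  | case3 idx acc h line himp hbrk ih =>
    have hcn : ¬(PySem.Str.startswith (out.getD idx "") "import "
        || PySem.Str.startswith (out.getD idx "") "from ") = true := himp
    have hbn : ¬(PySem.Str.strip (out.getD idx "") != ""
        && !PySem.Str.startswith (out.getD idx "") "#") = true := hbrk
    have hdc : List.drop idx out = out.getD idx "" :: List.drop (idx + 1) out := by
      rw [List.drop_eq_getElem_cons h, List.getD_eq_getElem _ _ h]
    have himp' : pvImp (out.getD idx "") = false := by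
      rcases hq : pvImp (out.getD idx "") with _ | _
      · rfl
      · exact absurd hq hcn
    have hhdr : pvHdr (out.getD idx "") = true := by
      have hb : (PySem.Str.strip (out.getD idx "") != ""
          && !PySem.Str.startswith (out.getD idx "") "#") = false := by
        rcases hq : (PySem.Str.strip (out.getD idx "") != ""
            && !PySem.Str.startswith (out.getD idx "") "#") with _ | _
        · rfl
        · exact absurd hq hbn
      rcases Bool.and_eq_false_iff.mp hb with hb' | hb'
      · have h1 : (PySem.Str.strip (out.getD idx "") == "") = true := by
          have hb'' : (!(PySem.Str.strip (out.getD idx "") == "")) = false := hb'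
          rcases hq : (PySem.Str.strip (out.getD idx "") == "") with _ | _
          · rw [hq] at hb''; exact absurd hb'' (by simp)
          · rfl
        unfold pvHdr; rw [h1]; simp
      · have h2 : PySem.Str.startswith (out.getD idx "") "#" = true := by
          simpa using hb'
        unfold pvHdr; rw [h2]; simp
    rw [aInsLoop, dif_pos h, if_neg hcn, if_neg hbn, ih, hdc, bHeaderLoop_cons,
      if_pos hhdr, pvLi_cons]
    cases hli : pvLi (bHeaderLoop (List.drop (idx + 1) out)) with
    | none => simp only [pvIns, himp', Bool.false_eq_true, if_false]
    | some k => simp only [pvIns]; omega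
  | case4 idx acc h =>
    rw [aInsLoop, dif_neg h, List.drop_eq_nil_of_le (by omega)]
    rfl

theorem insEq (out : List String) : aInsLoop out 0 0 = bRevScan (bHeaderLoop out).reverse := by
  rw [bRevScan_reverse, aInsLoop_eq out 0 0, List.drop_zero]

theorem pvSorted_lt (l : List String) (hnd : l.Nodup) :
    (PySem.List.sorted l id).Pairwise (· < ·) := by
  have hp := PySem.List.sorted_pairwise l id
  have hn : (PySem.List.sorted l id).Nodup :=
    (PySem.List.sorted_perm l id false).nodup_iff.mpr hnd
  exact (hp.and hn).imp (fun h => lt_of_le_of_ne h.1 h.2)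

theorem pvSorted_filter_comm (l : List String) (hnd : l.Nodup) (p : String → Bool) :
    PySem.List.sorted (l.filter p) id = (PySem.List.sorted l id).filter p := by
  refine PySem.List.sorted_eq_of_perm_of_pairwise_lt _ _ id
    ((PySem.List.sorted_perm l id false).filter p) ?_
  exact List.Pairwise.sublist List.filter_sublist (pvSorted_lt l hnd)

theorem refFoldEq (code : String) (l s0 : List String) (hnd : l.Nodup)
    (hdis : ∀ x ∈ l, x ∉ s0) :
    l.foldl (fun s name => if PySem.Str.isIn ("_" ++ name) code then PySem.Set.add s name else s) s0
      = s0 ++ l.filter (fun name => PySem.Str.isIn ("_" ++ name) code) := by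
  induction l generalizing s0 with
  | nil => simp
  | cons x xs ih =>
    rcases List.nodup_cons.mp hnd with ⟨hx, hxs⟩
    rw [List.foldl_cons]
    by_cases hc : (PySem.Str.isIn ("_" ++ x) code) = true
    · have hadd : PySem.Set.add s0 x = s0 ++ [x] := by
        simp [PySem.Set.add, hdis x (List.mem_cons_self)]
      rw [if_pos hc, hadd, ih (s0 ++ [x]) hxs (fun y hy hmem => by
        rcases List.mem_append.mp hmem with hm | hm
        · exact hdis y (List.mem_cons_of_mem _ hy) hm
        · exact hx (by simpa using (List.mem_singleton.mp hm ▸ hy)))]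
      simp only [List.filter_cons]
      rw [if_pos hc, List.append_assoc, List.singleton_append]
    · rw [if_neg hc, ih s0 hxs (fun y hy => hdis y (List.mem_cons_of_mem _ hy))]
      simp only [List.filter_cons]
      rw [if_neg (show ¬(PySem.Str.isIn ("_" ++ x) code) = true by rw [pvBoolFalse hc]; exact Bool.false_ne_true)]

theorem blocksFromR (d : PySem.Dict String String) (R : List String)
    (hsub : ∀ n ∈ R, n ∈ d.keys) :
    (PySem.List.sorted
        ((R.foldl (fun g fn =>
            match d.get? fn with
            | none => g
            | some mod => if mod = "" then g else g.modify mod [] (fun v => v ++ [fn]))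
          (∅ : PySem.Dict String (List String))).items) (fun p => p.1)).foldl (fun bs p =>
        let bs := bs ++ ["from ." ++ p.1 ++ " import ("]
        let bs := p.2.foldl (fun bs fn => bs ++ ["    " ++ fn ++ " as _" ++ fn ++ ","]) bs
        bs ++ [")"] ++ [""]) ([] : List String)
      = (PySem.List.sorted
          (PySem.Set.ofList ((R.map (fun n => d.getD n "")).filter (fun m => m != ""))) id).foldl
          (fun bs mod => bs ++ (["from ." ++ mod ++ " import ("]
            ++ (R.filter (fun n => d.getD n "" == mod)).map
                (fun fn => "    " ++ fn ++ " as _" ++ fn ++ ",")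
            ++ [")", ""])) ([] : List String) := by
  have hfold : R.foldl (fun g fn =>
        match d.get? fn with
        | none => g
        | some mod => if mod = "" then g else g.modify mod [] (fun v => v ++ [fn]))
      (∅ : PySem.Dict String (List String))
      = ((R.filter (fun n => d.getD n "" != "")).map (fun n => (d.getD n "", n))).foldl
          (fun g p => g.modify p.1 [] (fun v => v ++ [p.2])) ∅ := by
    rw [List.foldl_map, List.foldl_filter]
    refine (PySem.List.foldl_congr_mem R _ _ ∅ (fun acc n hn => ?_))
    have hcont : d.contains n = true := (PySem.Dict.contains_iff_mem_keys d n).mpr (hsub n hn)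
    have hsome : (d.get? n).isSome = true := by
      rw [← PySem.Dict.contains_eq_isSome_get?]; exact hcont
    obtain ⟨v, hv⟩ := Option.isSome_iff_exists.mp hsome
    have hval : d.getD n "" = v := by rw [PySem.Dict.getD_eq_get?_getD, hv]; rfl
    simp only [hv, hval]
    by_cases hve : v = ""
    · rw [if_pos hve, if_neg (by rw [hve]; simp)]
    · rw [if_neg hve, if_pos (by rw [bne_iff_ne]; exact hve)]
  rw [hfold]
  set R' := R.filter (fun n => d.getD n "" != "") with hR'
  set G := (R'.map (fun n => (d.getD n "", n))).foldl
      (fun g p => g.modify p.1 [] (fun v => v ++ [p.2])) (∅ : PySem.Dict String (List String)) with hG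
  have hkeys : G.keys = PySem.Set.ofList (R'.map (fun n => d.getD n "")) := by
    rw [hG, PySem.Dict.keys_foldl_modify_key, List.map_map]
    rfl
  have hknd : G.keys.Nodup := by rw [hkeys]; exact PySem.Set.nodup_ofList _
  have hgetD : ∀ mod, G.getD mod [] = R'.filter (fun n => d.getD n "" == mod) := by
    intro mod
    rw [hG, PySem.Dict.getD_foldl_modify_append, List.filter_map, List.map_map]
    rw [show ((fun (x : String × String) => x.2) ∘ fun n => (d.getD n "", n)) = (fun n => n) from rfl,
      show ((fun (p : String × String) => p.1 == mod) ∘ fun n => (d.getD n "", n))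
        = (fun n => d.getD n "" == mod) from rfl,
      show (∅ : PySem.Dict String (List String)).getD mod [] = [] from rfl,
      List.nil_append, List.map_id']
  have hitems : PySem.List.sorted G.items (fun p => p.1)
      = (PySem.List.sorted G.keys id).map (fun k => (k, G.getD k [])) := by
    refine PySem.List.sorted_eq_of_perm_of_pairwise_lt _ _ _ ?_ ?_
    · rw [PySem.Dict.items_eq_map_keys G hknd ([] : List String)]
      exact (PySem.List.sorted_perm G.keys id false).map _
    · exact List.pairwise_map.mpr (by simpa using pvSorted_lt G.keys hknd)
  have hmods : PySem.Set.ofList ((R.map (fun n => d.getD n "")).filter (fun m => m != "")) = G.keys := by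
    rw [hkeys, List.filter_map]
    rfl
  rw [hitems, hmods, List.foldl_map]
  refine PySem.List.foldl_congr_mem _ _ _ _ (fun bs k hk => ?_)
  have hkmem : k ∈ G.keys := ((PySem.List.sorted_perm G.keys id false).mem_iff).mp hk
  have hkne : k ≠ "" := by
    rw [hkeys] at hkmem
    rcases List.mem_map.mp ((PySem.Set.mem_ofList _ _).mp hkmem) with ⟨n, hn, hvn⟩
    have h2 := (List.mem_filter.mp hn).2
    rw [← hvn]; exact bne_iff_ne.mp h2
  have hff : R'.filter (fun n => d.getD n "" == k) = R.filter (fun n => d.getD n "" == k) := by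
    rw [hR', List.filter_filter]
    refine List.filter_congr (fun n hn => ?_)
    by_cases hvk : (d.getD n "" == k) = true
    · have hveq : d.getD n "" = k := beq_iff_eq.mp hvk
      rw [hvk]
      simp [hveq, bne_iff_ne, hkne]
    · rw [pvBoolFalse hvk]
      simp
  simp only []
  rw [PySem.List.foldl_append_singleton_eq_map, hgetD k, hff]
  simp [List.append_assoc]

theorem blocksEq (code : String) (d : PySem.Dict String String) (hnd : d.keys.Nodup) :
    (let referenced :=
        d.keys.foldl (fun s name => if PySem.Str.isIn ("_" ++ name) code then PySem.Set.add s name else s)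
          (PySem.Set.ofList [])
     let referenced := if referenced = [] then PySem.Set.ofList d.keys else referenced
     let grouped := (PySem.List.sorted referenced id).foldl (fun g fn =>
        match d.get? fn with
        | none => g
        | some mod => if mod = "" then g
          else g.modify mod [] (fun v => v ++ [fn]))
       (∅ : PySem.Dict String (List String))
     (PySem.List.sorted grouped.items (fun p => p.1)).foldl (fun bs p =>
        let bs := bs ++ ["from ." ++ p.1 ++ " import ("]
        let bs := p.2.foldl (fun bs fn => bs ++ ["    " ++ fn ++ " as _" ++ fn ++ ","]) bs
        bs ++ [")"] ++ [""]) ([] : List String)) =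
    (let names := PySem.List.sorted d.keys id
     let referenced := names.filter (fun n => PySem.Str.isIn ("_" ++ n) code)
     let referenced := if referenced = [] then names else referenced
     let mods := PySem.List.sorted
        (PySem.Set.ofList ((referenced.map (fun n => d.getD n "")).filter (fun m => m != ""))) id
     mods.foldl (fun bs mod =>
        bs ++ (["from ." ++ mod ++ " import ("]
          ++ (referenced.filter (fun n => d.getD n "" == mod)).map
              (fun fn => "    " ++ fn ++ " as _" ++ fn ++ ",")
          ++ [")", ""])) ([] : List String)) := by
  simp only
  have hdis : ∀ x ∈ d.keys, x ∉ PySem.Set.ofList ([] : List String) := by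
    intro x _ hx
    exact absurd hx (by rw [show PySem.Set.ofList ([] : List String) = [] from rfl]; simp)
  rw [refFoldEq code d.keys (PySem.Set.ofList []) hnd hdis,
    show PySem.Set.ofList ([] : List String) = [] from rfl, List.nil_append]
  by_cases hF : d.keys.filter (fun name => PySem.Str.isIn ("_" ++ name) code) = []
  · rw [if_pos hF, PySem.Set.ofList_eq_self_of_nodup d.keys hnd]
    have hBf : (PySem.List.sorted d.keys id).filter (fun n => PySem.Str.isIn ("_" ++ n) code) = [] := by
      rw [← pvSorted_filter_comm d.keys hnd, hF]
      rfl
    rw [hBf, if_pos rfl]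
    exact blocksFromR d (PySem.List.sorted d.keys id)
      (fun n hn => (PySem.List.sorted_perm d.keys id false).mem_iff.mp hn)
  · rw [if_neg hF, ← pvSorted_filter_comm d.keys hnd]
    have hne : PySem.List.sorted (d.keys.filter (fun n => PySem.Str.isIn ("_" ++ n) code)) id ≠ [] := by
      intro h
      exact hF (List.Perm.eq_nil
        (h ▸ (PySem.List.sorted_perm (d.keys.filter (fun n => PySem.Str.isIn ("_" ++ n) code)) id false).symm))
    rw [if_neg hne]
    exact blocksFromR d _
      (fun n hn => (List.mem_filter.mp
        ((PySem.List.sorted_perm _ id false).mem_iff.mp hn)).1)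

-- ===== VERDICT (by name: the statement is the Claim_ definition above) =====
theorem rewrite_main_relative_imports_py_spec : Claim_equal_rewrite_main_relative_imports_py := by
  intro code owners _
  unfold Spec_rewrite_main_relative_imports_py
  unfold rewrite_main_relative_imports_py rewrite_main_relative_imports_py_alt
  have hnd : (owners.foldl (fun d kv => d.insert kv.1 kv.2) (∅ : PySem.Dict String String)).keys.Nodup := by
    exact PySem.Dict.nodup_keys_foldl_insert_key owners Prod.fst (fun _ kv => kv.2) _ (by decide)
  have hb := blocksEq code (owners.foldl (fun d kv => d.insert kv.1 kv.2) (∅ : PySem.Dict String String)) hnd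
  simp only at hb ⊢
  rw [stripEq, insEq, hb]
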